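-- pv_equiv track=rewrite | github.com/tvirolai/aineistokartoitus | scripts/get-ematerials.py | isEmaterial
-- ===== SOURCE A (Python) =====
-- def getTag(line):
--     return line[10:13]
--
-- def getContent(line):
--     return line[18:]
--
-- def isEmaterial(record):
--     """
--     A record is classified as e-material if 008/23 = 'o' and 007/1 = 'r'
--
--     """
--     fields = [x for x in record if getTag(x) in ["007", "008"]]
--     f007 = list(filter(lambda x: getTag(x) == "007" and getContent(x)[1:2] ==
--         'r', fields))
--     f008 = list(filter(lambda x: getTag(x) == "008" and getContent(x)[23:24] ==
--         'o', fields))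
--     if len(f007) > 0 and len(f008) > 0:
--         return True
--     return False
-- ===== SOURCE B (Python) =====
-- def isEmaterial(record):
--     has007 = False
--     has008 = False
--     for line in record:
--         tag = line[10:13]
--         content = line[18:]
--         if tag == "007" and content[1:2] == 'r':
--             has007 = True
--         if tag == "008" and content[23:24] == 'o':
--             has008 = True
--     return has007 and has008
-- ===== Notes on version B (the rewrite author's own statement) =====
-- stated objective: simpler
-- what changed: Replaced A's three list-building passes (a membership pre-filter plus two filtered lists whose lengths are tested) with one loop over record maintaining two booleans.
import Mathlib
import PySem

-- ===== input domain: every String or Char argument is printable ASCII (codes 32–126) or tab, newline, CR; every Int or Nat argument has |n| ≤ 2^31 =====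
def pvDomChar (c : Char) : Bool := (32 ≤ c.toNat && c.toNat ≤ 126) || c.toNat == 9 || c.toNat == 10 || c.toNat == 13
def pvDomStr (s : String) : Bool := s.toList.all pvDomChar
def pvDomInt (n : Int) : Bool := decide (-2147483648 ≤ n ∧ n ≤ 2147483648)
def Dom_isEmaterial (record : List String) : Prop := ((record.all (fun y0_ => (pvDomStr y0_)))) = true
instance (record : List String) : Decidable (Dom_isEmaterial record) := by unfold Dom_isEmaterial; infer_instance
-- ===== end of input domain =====

-- B replaces A's three list-building passes by one accumulating scan over the record (different decomposition, not claimed faster).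

-- ===== PORT A =====
def getTag (line : String) : List Char := PySem.List.slice line.toList (some 10) (some 13)
def getContent (line : String) : List Char := PySem.List.slice line.toList (some 18) none

def isEmaterial (record : List String) : Bool :=
  let fields := record.filter (fun x => getTag x = "007".toList ∨ getTag x = "008".toList)
  let f007 := fields.filter (fun x => getTag x = "007".toList ∧ PySem.List.slice (getContent x) (some 1) (some 2) = ['r'])
  let f008 := fields.filter (fun x => getTag x = "008".toList ∧ PySem.List.slice (getContent x) (some 23) (some 24) = ['o'])
  if f007.length > 0 ∧ f008.length > 0 then true else false

-- ===== PORT B =====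
def isEmaterial_alt (record : List String) : Bool :=
  let st := record.foldl (fun (st : Bool × Bool) line =>
    let tag := PySem.List.slice line.toList (some 10) (some 13)
    let content := PySem.List.slice line.toList (some 18) none
    let h7 := if tag = "007".toList ∧ PySem.List.slice content (some 1) (some 2) = ['r'] then true else st.1
    let h8 := if tag = "008".toList ∧ PySem.List.slice content (some 23) (some 24) = ['o'] then true else st.2
    (h7, h8)) (false, false)
  st.1 && st.2

-- ===== PRECONDITION & SPEC =====
def Spec_isEmaterial (record : List String) (out : Bool) : Prop := out = isEmaterial_alt record
instance (record : List String) (out : Bool) : Decidable (Spec_isEmaterial record out) := by unfold Spec_isEmaterial; infer_instance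

-- ===== CLAIM (what is proved, stated in full; the proofs are below) =====
def Claim_equal_isEmaterial : Prop := ∀ (record : List String), Dom_isEmaterial record → Spec_isEmaterial record (isEmaterial record)

-- ===== LEMMAS AND PROOFS =====

-- B's fold accumulates exactly "some earlier line satisfies the 007 test" / "… 008 test".
lemma fold_char (record : List String) (s : Bool × Bool) :
    record.foldl (fun (st : Bool × Bool) line =>
      let tag := PySem.List.slice line.toList (some 10) (some 13)
      let content := PySem.List.slice line.toList (some 18) none
      let h7 := if tag = "007".toList ∧ PySem.List.slice content (some 1) (some 2) = ['r'] then true else st.1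
      let h8 := if tag = "008".toList ∧ PySem.List.slice content (some 23) (some 24) = ['o'] then true else st.2
      (h7, h8)) s
    = (s.1 || record.any (fun x => decide (getTag x = "007".toList ∧ PySem.List.slice (getContent x) (some 1) (some 2) = ['r'])),
       s.2 || record.any (fun x => decide (getTag x = "008".toList ∧ PySem.List.slice (getContent x) (some 23) (some 24) = ['o']))) := by
  induction record generalizing s with
  | nil => simp
  | cons hd tl ih =>
    simp only [List.foldl_cons, List.any_cons, ih]
    unfold getTag getContent
    by_cases h1 : PySem.List.slice hd.toList (some 10) (some 13) = "007".toList ∧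
        PySem.List.slice (PySem.List.slice hd.toList (some 18) none) (some 1) (some 2) = ['r'] <;>
      by_cases h2 : PySem.List.slice hd.toList (some 10) (some 13) = "008".toList ∧
        PySem.List.slice (PySem.List.slice hd.toList (some 18) none) (some 23) (some 24) = ['o'] <;>
      simp [h1, h2, Bool.or_assoc, Bool.or_comm]

-- A's double filter is non-empty iff some element passes the inner test (which implies the outer one).
lemma filter2_pos (l : List String) (p q : String → Bool) (h : ∀ x, p x = true → q x = true) :
    ((l.filter q).filter p).length > 0 ↔ l.any p = true := by
  rw [List.filter_filter, gt_iff_lt, List.length_pos_iff_exists_mem]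
  simp only [List.mem_filter, List.any_eq_true, Bool.and_eq_true]
  constructor
  · rintro ⟨x, hx, hp, hq⟩
    exact ⟨x, hx, hp⟩
  · rintro ⟨x, hx, hp⟩
    exact ⟨x, hx, hp, h x hp⟩

-- ===== VERDICT (by name: the statement is the Claim_ definition above) =====
theorem isEmaterial_spec : Claim_equal_isEmaterial := by
  intro record _
  unfold Spec_isEmaterial isEmaterial isEmaterial_alt
  rw [fold_char]
  simp only [Bool.false_or]
  have h7 := filter2_pos record
    (fun x => decide (getTag x = "007".toList ∧ PySem.List.slice (getContent x) (some 1) (some 2) = ['r']))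
    (fun x => decide (getTag x = "007".toList ∨ getTag x = "008".toList))
    (by intro x hx; simp only [decide_eq_true_eq] at hx ⊢; exact Or.inl hx.1)
  have h8 := filter2_pos record
    (fun x => decide (getTag x = "008".toList ∧ PySem.List.slice (getContent x) (some 23) (some 24) = ['o']))
    (fun x => decide (getTag x = "007".toList ∨ getTag x = "008".toList))
    (by intro x hx; simp only [decide_eq_true_eq] at hx ⊢; exact Or.inr hx.1)
  split_ifs with h
  · symm
    rw [Bool.and_eq_true]
    exact ⟨h7.mp h.1, h8.mp h.2⟩
  · symm
    rw [Bool.and_eq_false_iff]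
    rw [not_and_or] at h
    rcases h with h | h
    · exact Or.inl (by rw [Bool.eq_false_iff]; intro hh; exact h (h7.mpr hh))
    · exact Or.inr (by rw [Bool.eq_false_iff]; intro hh; exact h (h8.mpr hh))
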